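-- pv_equiv track=rewrite | github.com/mzperezous/grokking-the-coding-interview | python/src/sliding_window.py | length_of_longest_1s_after_k_substitutions
-- ===== SOURCE A (Python) =====
-- from typing import Dict, List
--
-- def length_of_longest_1s_after_k_substitutions(binary: List[int], k: int) -> int:
--
--     w_start, num_zeros, max_len = 0, 0, 0
--
--     for w_end, digit in enumerate(binary):
--         if digit == 0:
--             num_zeros += 1
--
--         while num_zeros > k:
--             if binary[w_start] == 0:
--                 num_zeros -= 1
--
--             w_start += 1
--
--         max_len = max(max_len, w_end + 1 - w_start)
--
--     return max_len
-- ===== SOURCE B (Python) =====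
-- from typing import Dict, List
--
-- def length_of_longest_1s_after_k_substitutions(binary: List[int], k: int) -> int:
--     # Block-of-zeros scan: flipping k zeros means choosing k consecutive zeros;
--     # the best window around choice i spans from just after the (i-1)-th zero
--     # to just before the (i+k)-th zero.
--     n = len(binary)
--     zeros = [i for i, d in enumerate(binary) if d == 0]
--     if len(zeros) <= k:
--         return n
--     best = 0
--     for i in range(len(zeros) - k + 1):
--         left = zeros[i - 1] + 1 if i > 0 else 0
--         right = zeros[i + k] if i + k < len(zeros) else n
--         if right - left > best:
--             best = right - left
--     return best
-- ===== Notes on version B (the rewrite author's own statement) =====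
-- stated objective: alternative
-- what changed: Replaced the sliding window with shrink loop by a scan over the list of zero positions: each choice of k consecutive zeros to flip yields one candidate window bounded by the neighbouring zeros, and B takes the maximum of these candidates.
-- outside the precondition, e.g. on length_of_longest_1s_after_k_substitutions([], -1): A returns 0, B raises IndexError
import Mathlib
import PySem

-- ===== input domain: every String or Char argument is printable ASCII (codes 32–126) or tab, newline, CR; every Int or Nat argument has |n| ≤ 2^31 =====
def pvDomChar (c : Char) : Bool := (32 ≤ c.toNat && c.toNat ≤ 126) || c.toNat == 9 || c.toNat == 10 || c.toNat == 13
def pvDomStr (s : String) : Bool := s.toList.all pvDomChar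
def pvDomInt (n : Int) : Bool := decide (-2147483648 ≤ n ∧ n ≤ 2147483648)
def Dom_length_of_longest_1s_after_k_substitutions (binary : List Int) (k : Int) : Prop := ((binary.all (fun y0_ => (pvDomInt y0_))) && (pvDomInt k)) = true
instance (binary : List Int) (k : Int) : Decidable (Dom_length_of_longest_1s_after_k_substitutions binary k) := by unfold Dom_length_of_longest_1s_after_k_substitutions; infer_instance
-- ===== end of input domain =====

-- B replaces A's sliding window by a scan over the zero positions (each choice of k
-- consecutive zeros to flip bounds one candidate window); same O(n) cost, different algorithm.

-- ===== PORT A =====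
-- the inner `while num_zeros > k:` loop; none = IndexError on binary[w_start]
def pvShrinkA (binary : List Int) (k : Int) (ws : Nat) (zeros : Int) : Option (Nat × Int) :=
  if k < zeros then
    match h : PySem.List.pyGet? binary (ws : Int) with
    | none => none
    | some d => pvShrinkA binary k (ws + 1) (if d = 0 then zeros - 1 else zeros)
  else some (ws, zeros)
termination_by binary.length - ws
decreasing_by
  have hlt : ws < binary.length := by
    by_contra hge
    rw [PySem.List.pyGet?_natCast] at h
    simp [List.getElem?_eq_none (by omega : binary.length ≤ ws)] at h
  omega

-- the `for w_end, digit in enumerate(binary):` loop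
def pvRunA (binary : List Int) (k : Int) : List Int → Nat → Nat → Int → Int → Option Int
  | [], _, _, _, maxLen => some maxLen
  | d :: rest, e, ws, zeros, maxLen =>
    match pvShrinkA binary k ws (if d = 0 then zeros + 1 else zeros) with
    | none => none
    | some (ws', zeros') =>
        pvRunA binary k rest (e + 1) ws' zeros' (max maxLen ((e : Int) + 1 - (ws' : Int)))

def length_of_longest_1s_after_k_substitutions (binary : List Int) (k : Int) : Int :=
  (pvRunA binary k binary 0 0 0 0).getD 0

-- ===== PORT B =====
-- zeros = [i for i, d in enumerate(binary) if d == 0]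
def pvZeroIdx : List Int → Int → List Int
  | [], _ => []
  | d :: rest, i => if d = 0 then i :: pvZeroIdx rest (i + 1) else pvZeroIdx rest (i + 1)

def length_of_longest_1s_after_k_substitutions_alt (binary : List Int) (k : Int) : Int :=
  let n : Int := binary.length
  let zeros := pvZeroIdx binary 0
  if (zeros.length : Int) ≤ k then n
  else
    (PySem.List.pyRange 0 ((zeros.length : Int) - k + 1) 1).foldl
      (fun best i =>
        let left : Int := if 0 < i then PySem.List.pyGetD zeros (i - 1) 0 + 1 else 0
        let right : Int := if i + k < (zeros.length : Int) then PySem.List.pyGetD zeros (i + k) 0 else n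
        if best < right - left then right - left else best) 0

-- ===== PRECONDITION & SPEC =====
-- Pre_ excludes k < 0: there A raises IndexError on every nonempty list (the shrink loop
-- runs w_start past the end) and returns 0 only on the empty list, where B's zero-block
-- scan itself raises IndexError; so all k < 0 inputs are outside Pre_.
def Pre_length_of_longest_1s_after_k_substitutions (binary : List Int) (k : Int) : Prop := 0 ≤ k
instance (binary : List Int) (k : Int) : Decidable (Pre_length_of_longest_1s_after_k_substitutions binary k) := by unfold Pre_length_of_longest_1s_after_k_substitutions; infer_instance

def pvWitness_length_of_longest_1s_after_k_substitutions : List Int × Int := ([1, 0, 1, 1, 0, 0, 1], 2)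

def Spec_length_of_longest_1s_after_k_substitutions (binary : List Int) (k : Int) (out : Int) : Prop := out = length_of_longest_1s_after_k_substitutions_alt binary k
instance (binary : List Int) (k : Int) (out : Int) : Decidable (Spec_length_of_longest_1s_after_k_substitutions binary k out) := by unfold Spec_length_of_longest_1s_after_k_substitutions; infer_instance

-- ===== CLAIM (what is proved, stated in full; the proofs are below) =====
def Claim_equal_length_of_longest_1s_after_k_substitutions : Prop := ∀ (binary : List Int) (k : Int), Dom_length_of_longest_1s_after_k_substitutions binary k → Pre_length_of_longest_1s_after_k_substitutions binary k → Spec_length_of_longest_1s_after_k_substitutions binary k (length_of_longest_1s_after_k_substitutions binary k)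

-- ===== LEMMAS AND PROOFS =====

def pvP (binary : List Int) (e : Nat) : Nat := (binary.take e).countP (fun d => d == 0)

def pvMS (binary : List Int) (k : Int) (e : Nat) : Nat :=
  Nat.find (p := fun s => (pvP binary e : Int) - (pvP binary s : Int) ≤ k ∨ e ≤ s) ⟨e, Or.inr le_rfl⟩

def pvZN : List Int → Nat → List Nat
  | [], _ => []
  | d :: rest, i => if d = 0 then i :: pvZN rest (i + 1) else pvZN rest (i + 1)

-- P lemmas
theorem pvP_zero (binary : List Int) : pvP binary 0 = 0 := rfl

theorem pvP_mono (binary : List Int) {s e : Nat} (h : s ≤ e) : pvP binary s ≤ pvP binary e :=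
  List.Sublist.countP_le (p := fun d => d == 0) (List.take_sublist_take_left h)

theorem pvP_succ (binary : List Int) {e : Nat} (he : e < binary.length) :
    pvP binary (e+1) = pvP binary e + (if binary[e] = 0 then 1 else 0) := by
  unfold pvP
  rw [List.take_succ_eq_append_getElem he, List.countP_append]
  split_ifs with h <;> simp [h]

-- MS lemmas
theorem pvMS_spec (binary : List Int) (k : Int) (e : Nat) :
    (pvP binary e : Int) - (pvP binary (pvMS binary k e) : Int) ≤ k ∨ e ≤ pvMS binary k e := by
  unfold pvMS; exact Nat.find_spec (p := fun s => (pvP binary e : Int) - (pvP binary s : Int) ≤ k ∨ e ≤ s) ⟨e, Or.inr le_rfl⟩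

theorem pvMS_le (binary : List Int) (k : Int) (e : Nat) : pvMS binary k e ≤ e := by
  unfold pvMS; exact Nat.find_le (Or.inr le_rfl)

theorem pvMS_le_of_valid (binary : List Int) (k : Int) {e s : Nat}
    (h : (pvP binary e : Int) - (pvP binary s : Int) ≤ k) : pvMS binary k e ≤ s := by
  unfold pvMS; exact Nat.find_le (Or.inl h)

theorem pvMS_min (binary : List Int) (k : Int) {e s : Nat} (h : s < pvMS binary k e) :
    ¬ ((pvP binary e : Int) - (pvP binary s : Int) ≤ k) := by
  unfold pvMS at h
  have := Nat.find_min (H := ⟨e, Or.inr le_rfl⟩) h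
  intro hv; exact this (Or.inl hv)

theorem pvMS_valid (binary : List Int) {k : Int} (hk : 0 ≤ k) (e : Nat) :
    (pvP binary e : Int) - (pvP binary (pvMS binary k e) : Int) ≤ k := by
  rcases pvMS_spec binary k e with h | h
  · exact h
  · have : pvMS binary k e = e := le_antisymm (pvMS_le _ _ _) h
    rw [this]; omega

theorem pvMS_zero (binary : List Int) {k : Int} (hk : 0 ≤ k) : pvMS binary k 0 = 0 :=
  Nat.le_zero.mp (pvMS_le_of_valid binary k (by simp [pvP_zero]; omega))

theorem pvShrinkA_eq (binary : List Int) {k : Int} (hk : 0 ≤ k) {e : Nat} (he : e < binary.length) :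
    ∀ (fuel ws : Nat), e + 1 - ws ≤ fuel → ws ≤ e + 1 →
    (∀ s, s < ws → ¬ ((pvP binary (e+1) : Int) - (pvP binary s : Int) ≤ k)) →
    pvShrinkA binary k ws ((pvP binary (e+1) : Int) - (pvP binary ws : Int)) =
      some (pvMS binary k (e+1), (pvP binary (e+1) : Int) - (pvP binary (pvMS binary k (e+1)) : Int)) := by
  intro fuel
  induction fuel with
  | zero =>
    intro ws hf hws hmin
    have hwse : ws = e + 1 := by omega
    subst hwse
    rw [pvShrinkA]
    have hz : (pvP binary (e+1) : Int) - (pvP binary (e+1) : Int) = 0 := by omega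
    rw [if_neg (by omega)]
    have hms : pvMS binary k (e+1) = e + 1 := by
      have h1 := pvMS_le binary k (e+1)
      by_contra hne
      exact hmin _ (by omega) (pvMS_valid binary hk (e+1))
    rw [hms]
  | succ f ih =>
    intro ws hf hws hmin
    rw [pvShrinkA]
    by_cases hz : k < (pvP binary (e+1) : Int) - (pvP binary ws : Int)
    · rw [if_pos hz]
      have hwsle : ws ≤ e := by
        by_contra h
        have : ws = e + 1 := by omega
        subst this
        omega
      have hlt : ws < binary.length := by omega
      have hget : PySem.List.pyGet? binary (ws : Int) = some binary[ws] :=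
        PySem.List.pyGet?_ofNat (xs := binary) (n := ws) hlt
      have hstep : (pvP binary (e+1) : Int) - (pvP binary (ws+1) : Int)
          = (if binary[ws] = 0 then ((pvP binary (e+1) : Int) - (pvP binary ws : Int)) - 1
             else (pvP binary (e+1) : Int) - (pvP binary ws : Int)) := by
        have := pvP_succ binary hlt
        split_ifs with h0 <;> simp [h0] at this <;> omega
      have hmin' : ∀ s, s < ws + 1 → ¬ ((pvP binary (e+1) : Int) - (pvP binary s : Int) ≤ k) := by
        intro s hs
        rcases Nat.lt_succ_iff_lt_or_eq.mp hs with h | h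
        · exact hmin s h
        · subst h; omega
      have hih := ih (ws + 1) (by omega) (by omega) hmin'
      split
      · next heq => rw [hget] at heq; exact absurd heq (by simp)
      · next d heq =>
          rw [hget] at heq
          have hd : d = binary[ws] := by injection heq with h'; exact h'.symm
          subst hd
          rw [← hstep]
          exact hih
    · rw [if_neg hz]
      rw [not_lt] at hz
      have hms : pvMS binary k (e+1) = ws := by
        have h1 : pvMS binary k (e+1) ≤ ws := pvMS_le_of_valid binary k hz
        by_contra hne
        exact hmin _ (by omega) (pvMS_valid binary hk (e+1))
      rw [hms]

theorem pvRunA_eq (binary : List Int) {k : Int} (hk : 0 ≤ k) :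
    ∀ (rest : List Int) (e : Nat) (maxLen : Int), rest = binary.drop e → e ≤ binary.length →
    pvRunA binary k rest e (pvMS binary k e)
        ((pvP binary e : Int) - (pvP binary (pvMS binary k e) : Int)) maxLen
      = some (((List.range' (e+1) (binary.length - e)).map
          (fun t : Nat => (t : Int) - (pvMS binary k t : Int))).foldl max maxLen) := by
  intro rest
  induction rest with
  | nil =>
    intro e maxLen hdrop he
    have : e = binary.length := by
      have := congrArg List.length hdrop
      simp at this
      omega
    subst this
    simp [pvRunA]
  | cons d rest' ih =>
    intro e maxLen hdrop he
    have helt : e < binary.length := by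
      by_contra h
      rw [List.drop_eq_nil_of_le (by omega)] at hdrop
      simp at hdrop
    have hd : d = binary[e] ∧ rest' = binary.drop (e+1) := by
      rw [List.drop_eq_getElem_cons helt] at hdrop
      exact ⟨(List.cons.injEq _ _ _ _ ▸ hdrop).1, (List.cons.injEq _ _ _ _ ▸ hdrop).2⟩
    obtain ⟨hd1, hd2⟩ := hd
    rw [pvRunA]
    have hz' : (if d = 0 then ((pvP binary e : Int) - (pvP binary (pvMS binary k e) : Int)) + 1
                else (pvP binary e : Int) - (pvP binary (pvMS binary k e) : Int))
        = (pvP binary (e+1) : Int) - (pvP binary (pvMS binary k e) : Int) := by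
      have := pvP_succ binary helt
      subst hd1
      split_ifs with h0 <;> simp [h0] at this <;> omega
    rw [hz']
    have hmin : ∀ s, s < pvMS binary k e → ¬ ((pvP binary (e+1) : Int) - (pvP binary s : Int) ≤ k) := by
      intro s hs hv
      have h1 := pvMS_min binary k hs
      have h2 := pvP_mono binary (Nat.le_succ e)
      omega
    have hshr := pvShrinkA_eq binary hk helt (e + 1 - pvMS binary k e) (pvMS binary k e)
      le_rfl (le_trans (pvMS_le _ _ _) (Nat.le_succ e)) hmin
    rw [hshr]
    dsimp only
    have hrec := ih (e+1) (max maxLen ((e : Int) + 1 - (pvMS binary k (e+1) : Int))) hd2 (by omega)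
    rw [hrec]
    have hrange : List.range' (e+1) (binary.length - e)
        = (e+1) :: List.range' (e+2) (binary.length - (e+1)) := by
      have : binary.length - e = (binary.length - (e+1)) + 1 := by omega
      rw [this, List.range'_succ]
    rw [hrange]
    simp only [List.map_cons, List.foldl_cons]
    norm_num

theorem portA_eq (binary : List Int) {k : Int} (hk : 0 ≤ k) :
    (pvRunA binary k binary 0 0 0 0).getD 0
      = ((List.range' 1 binary.length).map
          (fun t : Nat => (t : Int) - (pvMS binary k t : Int))).foldl max 0 := by
  have h0 : pvMS binary k 0 = 0 := pvMS_zero binary hk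
  have := pvRunA_eq binary hk binary 0 0 rfl (Nat.zero_le _)
  rw [h0] at this
  simp [pvP_zero] at this
  simp [this]

theorem pvZeroIdx_eq : ∀ (l : List Int) (j : Nat),
    pvZeroIdx l (j : Int) = (pvZN l j).map (fun z : Nat => (z : Int)) := by
  intro l
  induction l with
  | nil => intro j; rfl
  | cons d rest ih =>
    intro j
    have : (j : Int) + 1 = ((j + 1 : Nat) : Int) := by push_cast; ring
    simp only [pvZeroIdx, pvZN, this, ih (j+1)]
    split_ifs <;> simp

theorem pvZN_ge : ∀ (l : List Int) (j : Nat), ∀ z ∈ pvZN l j, j ≤ z := by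
  intro l
  induction l with
  | nil => intro j z hz; simp [pvZN] at hz
  | cons d rest ih =>
    intro j z hz
    simp only [pvZN] at hz
    split_ifs at hz with h
    · rw [List.mem_cons] at hz
      rcases hz with hz | hz
      · omega
      · have := ih (j+1) z hz; omega
    · have := ih (j+1) z hz; omega

theorem pvZN_lt : ∀ (l : List Int) (j : Nat), ∀ z ∈ pvZN l j, z < j + l.length := by
  intro l
  induction l with
  | nil => intro j z hz; simp [pvZN] at hz
  | cons d rest ih =>
    intro j z hz
    simp only [pvZN] at hz
    have hlen : (d :: rest).length = rest.length + 1 := by simp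
    split_ifs at hz with h
    · rw [List.mem_cons] at hz
      rcases hz with hz | hz
      · omega
      · have := ih (j+1) z hz; omega
    · have := ih (j+1) z hz; omega

theorem pvZN_sorted : ∀ (l : List Int) (j : Nat), (pvZN l j).Pairwise (· < ·) := by
  intro l
  induction l with
  | nil => intro j; simp [pvZN]
  | cons d rest ih =>
    intro j
    simp only [pvZN]
    split_ifs with h
    · exact List.Pairwise.cons (fun z hz => by have := pvZN_ge rest (j+1) z hz; omega) (ih (j+1))
    · exact ih (j+1)

theorem pvP_countP : ∀ (l : List Int) (j e : Nat),
    (l.take e).countP (fun d => d == 0) = (pvZN l j).countP (fun z => decide (z < j + e)) := by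
  intro l
  induction l with
  | nil => intro j e; simp [pvZN]
  | cons d rest ih =>
    intro j e
    cases e with
    | zero =>
      simp only [List.take_zero, List.countP_nil, Nat.add_zero]
      symm
      rw [List.countP_eq_zero]
      intro z hz
      have := pvZN_ge _ _ z hz
      simp; omega
    | succ e' =>
      have hih := ih (j+1) e'
      have h2 : j + 1 + e' = j + (e' + 1) := by omega
      rw [h2] at hih
      by_cases h : d = 0
      · simp only [List.take_succ_cons, List.countP_cons, pvZN, if_pos h]
        simp [h, hih]
      · simp only [List.take_succ_cons, List.countP_cons, pvZN, if_neg h]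
        simp [h, hih]

-- index/count correspondence for a strictly sorted list
theorem sorted_countP_lt : ∀ (Z : List Nat), Z.Pairwise (· < ·) →
    ∀ (e i : Nat), (hi : i < Z.length) → (Z[i] < e ↔ i < Z.countP (fun z => decide (z < e))) := by
  intro Z
  induction Z with
  | nil => intro _ e i hi; simp at hi
  | cons z rest ih =>
    intro hs e i hi
    obtain ⟨hz, hs'⟩ := List.pairwise_cons.mp hs
    by_cases hze : z < e
    · cases i with
      | zero =>
        simp only [List.getElem_cons_zero, List.countP_cons]
        simp [hze]
      | succ i' =>
        have hi' : i' < rest.length := by simp at hi; omega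
        simp only [List.getElem_cons_succ, List.countP_cons]
        rw [ih hs' e i' hi']
        simp [hze]
    · have hc : rest.countP (fun z => decide (z < e)) = 0 := by
        rw [List.countP_eq_zero]
        intro x hx
        have := hz x hx
        simp; omega
      have hzc : (z :: rest).countP (fun z => decide (z < e)) = 0 := by
        simp [hc, hze]
      rw [hzc]
      cases i with
      | zero => simp [hze]
      | succ i' =>
        have hi' : i' < rest.length := by simp at hi; omega
        simp only [List.getElem_cons_succ]
        constructor
        · intro h
          have := hz _ (List.getElem_mem hi')
          omega
        · omega

theorem foldl_max_le (l : List Int) : ∀ (a c : Int), a ≤ c → (∀ x ∈ l, x ≤ c) → l.foldl max a ≤ c := by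
  induction l with
  | nil => intro a c ha _; simpa using ha
  | cons x rest ih =>
    intro a c ha hall
    simp only [List.foldl_cons]
    exact ih _ _ (max_le ha (hall x (by simp))) (fun y hy => hall y (by simp [hy]))

theorem getD_map_cast (Z : List Nat) (i : Nat) :
    (Z.map (fun z : Nat => (z : Int))).getD i 0 = ((Z.getD i 0 : Nat) : Int) := by
  simp [List.getD_eq_getElem?_getD]
  cases Z[i]? <;> simp

theorem pvZeroIdx_zero (binary : List Int) :
    pvZeroIdx binary 0 = (pvZN binary 0).map (fun z : Nat => (z : Int)) := by
  have := pvZeroIdx_eq binary 0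
  simpa using this

theorem pvP_eq (binary : List Int) (e : Nat) :
    pvP binary e = (pvZN binary 0).countP (fun z => decide (z < e)) := by
  have := pvP_countP binary 0 e
  simpa [pvP] using this

theorem pvP_len (binary : List Int) :
    pvP binary binary.length = (pvZN binary 0).length := by
  rw [pvP_eq, List.countP_eq_length]
  intro z hz
  have := pvZN_lt binary 0 z hz
  simp; omega

-- index/count correspondence specialised to pvZN
theorem pvZ_lt_iff (binary : List Int) {i : Nat} (hi : i < (pvZN binary 0).length) (e : Nat) :
    ((pvZN binary 0).getD i 0 < e ↔ i < pvP binary e) := by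
  rw [pvP_eq, List.getD_eq_getElem?_getD, List.getElem?_eq_getElem hi]
  simpa using sorted_countP_lt (pvZN binary 0) (pvZN_sorted binary 0) e i hi

theorem pvP_at_Z (binary : List Int) {i : Nat} (hi : i < (pvZN binary 0).length) :
    pvP binary ((pvZN binary 0).getD i 0) = i := by
  have h1 := pvZ_lt_iff binary hi ((pvZN binary 0).getD i 0)
  have h2 : ¬ ((pvZN binary 0).getD i 0 < (pvZN binary 0).getD i 0) := by omega
  have hle : pvP binary ((pvZN binary 0).getD i 0) ≤ i := by
    by_contra h; exact h2 (h1.mpr (by omega))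
  rcases Nat.eq_zero_or_pos i with h0 | h0
  · omega
  · have hi' : i - 1 < (pvZN binary 0).length := by omega
    have h3 := pvZ_lt_iff binary hi' ((pvZN binary 0).getD i 0)
    have hsort : (pvZN binary 0).getD (i-1) 0 < (pvZN binary 0).getD i 0 := by
      have := List.pairwise_iff_getElem.mp (pvZN_sorted binary 0) (i-1) i hi' hi (by omega)
      simpa [List.getD_eq_getElem?_getD, List.getElem?_eq_getElem hi, List.getElem?_eq_getElem hi'] using this
    have := h3.mp hsort
    omega

theorem pvP_at_Z_succ (binary : List Int) {i : Nat} (hi : i < (pvZN binary 0).length) :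
    pvP binary ((pvZN binary 0).getD i 0 + 1) = i + 1 := by
  have h1 := pvZ_lt_iff binary hi ((pvZN binary 0).getD i 0 + 1)
  have hge : i + 1 ≤ pvP binary ((pvZN binary 0).getD i 0 + 1) := h1.mp (by omega)
  by_cases hi1 : i + 1 < (pvZN binary 0).length
  · have h2 := pvZ_lt_iff binary hi1 ((pvZN binary 0).getD i 0 + 1)
    have hsort : (pvZN binary 0).getD i 0 < (pvZN binary 0).getD (i+1) 0 := by
      have := List.pairwise_iff_getElem.mp (pvZN_sorted binary 0) i (i+1) hi hi1 (by omega)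
      simpa [List.getD_eq_getElem?_getD, List.getElem?_eq_getElem hi, List.getElem?_eq_getElem hi1] using this
    have hnot : ¬ ((pvZN binary 0).getD (i+1) 0 < (pvZN binary 0).getD i 0 + 1) := by omega
    have := fun h => hnot (h2.mpr h)
    omega
  · have hle : pvP binary ((pvZN binary 0).getD i 0 + 1) ≤ (pvZN binary 0).length := by
      rw [pvP_eq]; exact List.countP_le_length
    omega

def pvLeft (binary : List Int) (i : Nat) : Nat :=
  if 0 < i then (pvZN binary 0).getD (i - 1) 0 + 1 else 0

def pvRight (binary : List Int) (K i : Nat) : Nat :=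
  if i + K < (pvZN binary 0).length then (pvZN binary 0).getD (i + K) 0 else binary.length

def pvCand (binary : List Int) (K i : Nat) : Int :=
  (pvRight binary K i : Int) - (pvLeft binary i : Int)

theorem pvP_right (binary : List Int) {K i : Nat} (h : i + K ≤ (pvZN binary 0).length) :
    pvP binary (pvRight binary K i) = i + K := by
  unfold pvRight
  split_ifs with hlt
  · exact pvP_at_Z binary hlt
  · have : i + K = (pvZN binary 0).length := by omega
    rw [pvP_len binary, this]

theorem pvP_left (binary : List Int) {i : Nat} (h : i ≤ (pvZN binary 0).length) :
    pvP binary (pvLeft binary i) = i := by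
  unfold pvLeft
  split_ifs with hpos
  · have hi : i - 1 < (pvZN binary 0).length := by omega
    have := pvP_at_Z_succ binary hi
    rw [this]; omega
  · have : i = 0 := by omega
    rw [pvP_zero, this]

theorem pvMS_right (binary : List Int) {k : Int} {K i : Nat} (hK : (K : Int) = k)
    (h : i + K ≤ (pvZN binary 0).length) :
    pvMS binary k (pvRight binary K i) = pvLeft binary i := by
  have hR := pvP_right binary h
  have hL := pvP_left binary (i := i) (by omega)
  apply le_antisymm
  · apply pvMS_le_of_valid
    rw [hR, hL]; push_cast; omega
  · by_contra hlt
    rw [not_le] at hlt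
    have hvalid := pvMS_valid binary (by omega : (0:Int) ≤ k) (pvRight binary K i)
    have hipos : 0 < i := by
      by_contra h0
      have : pvLeft binary i = 0 := by unfold pvLeft; simp; omega
      omega
    have hle : pvMS binary k (pvRight binary K i) ≤ (pvZN binary 0).getD (i-1) 0 := by
      unfold pvLeft at hlt; rw [if_pos hipos] at hlt; omega
    have hPZ : pvP binary ((pvZN binary 0).getD (i-1) 0) = i - 1 :=
      pvP_at_Z binary (by omega)
    have hmono := pvP_mono binary hle
    rw [hR] at hvalid
    rw [hPZ] at hmono
    have : (pvP binary (pvMS binary k (pvRight binary K i)) : Int) ≤ (i:Int) - 1 := by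
      omega
    omega

theorem pvRight_le (binary : List Int) (K i : Nat) : pvRight binary K i ≤ binary.length := by
  unfold pvRight
  split_ifs with hlt
  · have hmem : (pvZN binary 0).getD (i+K) 0 ∈ pvZN binary 0 := by
      rw [List.getD_eq_getElem?_getD, List.getElem?_eq_getElem hlt]
      exact List.getElem_mem hlt
    have := pvZN_lt binary 0 _ hmem
    omega
  · exact le_rfl

theorem portB_eq (binary : List Int) {k : Int} (hk : 0 ≤ k)
    (hlt : k < ((pvZN binary 0).length : Int)) :
    length_of_longest_1s_after_k_substitutions_alt binary k
      = ((List.range ((pvZN binary 0).length - k.toNat + 1)).map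
          (pvCand binary k.toNat)).foldl max 0 := by
  have hK : (k.toNat : Int) = k := Int.toNat_of_nonneg hk
  set Z := pvZN binary 0 with hZ
  set m := Z.length with hm
  set K := k.toNat with hKdef
  unfold length_of_longest_1s_after_k_substitutions_alt
  rw [pvZeroIdx_zero]
  simp only [List.length_map, ← hZ, ← hm]
  rw [if_neg (by omega)]
  have hcast : (m : Int) - k + 1 = ((m - K + 1 : Nat) : Int) := by
    push_cast [hKdef]
    omega
  rw [hcast, PySem.List.pyRange_zero_natCast, List.foldl_map, List.foldl_map]
  apply PySem.List.foldl_congr_mem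
  intro best j hj
  have hjle : j ≤ m - K := by
    have := List.mem_range.mp hj
    omega
  have hKm : K < m := by omega
  have hjK : j + K ≤ m := by omega
  have hleft : (if 0 < (j : Int) then PySem.List.pyGetD (Z.map (fun z : Nat => (z : Int))) ((j : Int) - 1) 0 + 1 else 0)
      = ((pvLeft binary j : Nat) : Int) := by
    unfold pvLeft
    by_cases hj0 : 0 < j
    · rw [if_pos (by exact_mod_cast hj0), if_pos hj0]
      have : (j : Int) - 1 = ((j - 1 : Nat) : Int) := by omega
      rw [this, PySem.List.pyGetD_natCast, getD_map_cast]
      push_cast; ring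
    · rw [if_neg (by exact_mod_cast hj0), if_neg hj0]
      simp
  have hright : (if (j : Int) + k < (m : Int) then PySem.List.pyGetD (Z.map (fun z : Nat => (z : Int))) ((j : Int) + k) 0 else (binary.length : Int))
      = ((pvRight binary K j : Nat) : Int) := by
    unfold pvRight
    have hcast2 : (j : Int) + k = ((j + K : Nat) : Int) := by push_cast [hKdef]; omega
    by_cases hjk : j + K < m
    · rw [if_pos (by rw [hcast2]; exact_mod_cast hjk), if_pos hjk]
      rw [hcast2, PySem.List.pyGetD_natCast, getD_map_cast]
    · rw [if_neg (by rw [hcast2]; exact_mod_cast hjk), if_neg hjk]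
  simp only [hleft, hright]
  unfold pvCand
  rw [max_def]
  split_ifs with h1 h2 h2 <;> omega

theorem candidate_le_A (binary : List Int) {k : Int} (hk : 0 ≤ k) {i : Nat}
    (hi : i ≤ (pvZN binary 0).length - k.toNat) (hKm : k.toNat < (pvZN binary 0).length) :
    pvCand binary k.toNat i
      ≤ ((List.range' 1 binary.length).map
          (fun t : Nat => (t : Int) - (pvMS binary k t : Int))).foldl max 0 := by
  have hK : (k.toNat : Int) = k := Int.toNat_of_nonneg hk
  have hjK : i + k.toNat ≤ (pvZN binary 0).length := by omega
  have hMS := pvMS_right binary hK hjK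
  have hle := pvRight_le binary k.toNat i
  have hmsle := pvMS_le binary k (pvRight binary k.toNat i)
  rcases Nat.eq_zero_or_pos (pvRight binary k.toNat i) with h0 | h0
  · have : pvCand binary k.toNat i ≤ 0 := by
      unfold pvCand
      rw [← hMS]
      rw [h0] at hmsle ⊢
      omega
    calc pvCand binary k.toNat i ≤ 0 := this
      _ ≤ _ := (PySem.List.le_foldl_max _ 0).1
  · have hmem : pvRight binary k.toNat i ∈ List.range' 1 binary.length := by
      rw [List.mem_range'_1]
      omega
    have hfmem : ((pvRight binary k.toNat i : Nat) : Int) - (pvMS binary k (pvRight binary k.toNat i) : Int)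
        ∈ (List.range' 1 binary.length).map (fun t : Nat => (t : Int) - (pvMS binary k t : Int)) :=
      List.mem_map.mpr ⟨_, hmem, rfl⟩
    have := (PySem.List.le_foldl_max ((List.range' 1 binary.length).map
        (fun t : Nat => (t : Int) - (pvMS binary k t : Int))) 0).2 _ hfmem
    unfold pvCand
    rw [← hMS]
    exact this

theorem window_le_B (binary : List Int) {k : Int} (hk : 0 ≤ k) {t : Nat}
    (ht : t ≤ binary.length) (hKm : k.toNat < (pvZN binary 0).length) :
    (t : Int) - (pvMS binary k t : Int)
      ≤ ((List.range ((pvZN binary 0).length - k.toNat + 1)).map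
          (pvCand binary k.toNat)).foldl max 0 := by
  have hK : (k.toNat : Int) = k := Int.toNat_of_nonneg hk
  set Z := pvZN binary 0 with hZ
  set m := Z.length with hm
  set K := k.toNat with hKdef
  set s := pvMS binary k t with hs
  set i0 := min (pvP binary s) (m - K) with hi0
  have hi0le : i0 ≤ m - K := min_le_right _ _
  have hi0mem : i0 ∈ List.range (m - K + 1) := List.mem_range.mpr (by omega)
  -- left bound
  have hleft : pvLeft binary i0 ≤ s := by
    unfold pvLeft
    split_ifs with hpos
    · have h1 : i0 - 1 < pvP binary s := by
        have := min_le_left (pvP binary s) (m - K)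
        omega
      have h2 : i0 - 1 < m := by omega
      have := (pvZ_lt_iff binary (i := i0 - 1) (by rw [← hZ, ← hm]; omega) s).mpr h1
      omega
    · omega
  -- right bound
  have hPt : pvP binary t ≤ pvP binary s + K := by
    have := pvMS_valid binary hk t
    rw [← hs] at this
    omega
  have hright : t ≤ pvRight binary K i0 := by
    unfold pvRight
    rw [← hZ, ← hm]
    split_ifs with hik
    · by_contra hcon
      rw [not_le] at hcon
      have h1 : Z.getD (i0 + K) 0 < t := by omega
      have h2 := (pvZ_lt_iff binary (i := i0 + K) (by rw [← hZ, ← hm]; omega) t).mp (by rw [← hZ]; exact h1)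
      have : i0 = m - K → False := by intro h; omega
      have hps : i0 = pvP binary s := by
        rcases Nat.le_total (pvP binary s) (m - K) with h | h
        · rw [hi0, min_eq_left h]
        · exfalso; exact this (by rw [hi0, min_eq_right h])
      omega
    · exact ht
  have hcand : (t : Int) - (s : Int) ≤ pvCand binary K i0 := by
    unfold pvCand
    have h1 : (pvLeft binary i0 : Int) ≤ (s : Int) := by exact_mod_cast hleft
    have h2 : (t : Int) ≤ (pvRight binary K i0 : Int) := by exact_mod_cast hright
    omega
  have hmem : pvCand binary K i0 ∈ (List.range (m - K + 1)).map (pvCand binary K) :=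
    List.mem_map.mpr ⟨_, hi0mem, rfl⟩
  calc (t : Int) - (s : Int) ≤ pvCand binary K i0 := hcand
    _ ≤ _ := (PySem.List.le_foldl_max _ 0).2 _ hmem

theorem foldl_max_range' (n : Nat) :
    ((List.range' 1 n).map (fun t : Nat => (t : Int))).foldl max 0 = (n : Int) := by
  apply le_antisymm
  · apply foldl_max_le
    · exact_mod_cast Nat.zero_le n
    · intro x hx
      obtain ⟨t, ht, rfl⟩ := List.mem_map.mp hx
      have := List.mem_range'_1.mp ht
      exact_mod_cast (by omega : t ≤ n)
  · rcases Nat.eq_zero_or_pos n with h0 | h0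
    · subst h0; simp
    · have hmem : n ∈ List.range' 1 n := List.mem_range'_1.mpr ⟨by omega, by omega⟩
      exact (PySem.List.le_foldl_max _ 0).2 _ (List.mem_map.mpr ⟨n, hmem, rfl⟩)

theorem portAB (binary : List Int) {k : Int} (hk : 0 ≤ k) :
    (pvRunA binary k binary 0 0 0 0).getD 0
      = length_of_longest_1s_after_k_substitutions_alt binary k := by
  rw [portA_eq binary hk]
  by_cases hcase : ((pvZN binary 0).length : Int) ≤ k
  · -- all zeros can be flipped: both sides are the full length
    have halt : length_of_longest_1s_after_k_substitutions_alt binary k = (binary.length : Int) := by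
      unfold length_of_longest_1s_after_k_substitutions_alt
      rw [pvZeroIdx_zero]
      simp only [List.length_map]
      rw [if_pos hcase]
    rw [halt]
    have hms : ∀ t : Nat, t ≤ binary.length → pvMS binary k t = 0 := by
      intro t ht
      refine Nat.le_zero.mp (pvMS_le_of_valid binary k ?_)
      have h1 : pvP binary t ≤ (pvZN binary 0).length := by
        rw [← pvP_len binary]
        exact pvP_mono binary ht
      rw [pvP_zero]
      push_cast
      omega
    have hmap : (List.range' 1 binary.length).map
          (fun t : Nat => (t : Int) - (pvMS binary k t : Int))
        = (List.range' 1 binary.length).map (fun t : Nat => (t : Int)) := by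
      apply List.map_congr_left
      intro t ht
      have := List.mem_range'_1.mp ht
      rw [hms t (by omega)]
      simp
    rw [hmap, foldl_max_range']
  · rw [not_le] at hcase
    rw [portB_eq binary hk hcase]
    have hKm : k.toNat < (pvZN binary 0).length := by omega
    apply le_antisymm
    · apply foldl_max_le
      · exact (PySem.List.le_foldl_max _ 0).1
      · intro x hx
        obtain ⟨t, ht, rfl⟩ := List.mem_map.mp hx
        have := List.mem_range'_1.mp ht
        exact window_le_B binary hk (by omega) hKm
    · apply foldl_max_le
      · exact (PySem.List.le_foldl_max _ 0).1
      · intro x hx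
        obtain ⟨i, hi, rfl⟩ := List.mem_map.mp hx
        have := List.mem_range.mp hi
        exact candidate_le_A binary hk (by omega) hKm

-- ===== VERDICT (by name: the statement is the Claim_ definition above) =====
theorem length_of_longest_1s_after_k_substitutions_spec : Claim_equal_length_of_longest_1s_after_k_substitutions := by
  intro binary k _ hk
  unfold Spec_length_of_longest_1s_after_k_substitutions
  unfold length_of_longest_1s_after_k_substitutions
  exact portAB binary hk
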